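-- pv_equiv track=rewrite | github.com/peter-as/advent-of-code | 2015/05.py | new_rules
-- ===== SOURCE A (Python) =====
-- def new_rules(words: list[str]) -> int:
--     """
--     Looks for nice words that fulfill 2 new rules of not having 2 same characters with another in between,
--     and having a pair of consecutive characters appearing at least twice seperately in the string
--
--     Args:
--         words: The list of words
--
--     Returns:
--         The number of nice words
--     """
--     total = 0
--     for i in words:
--         doub = False
--         between = False
--         for letter in range(len(i) - 2):
--             if i[letter] + i[letter + 1] in i[letter + 2:]:
--                 doub = True
--             if i[letter] == i[letter + 2]:
--                 between = True
--         if doub and between: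
--             total += 1
--     return total
-- ===== SOURCE B (Python) =====
-- def new_rules(words: list[str]) -> int:
--     """Single pass per word: a dict keeps the first index of each consecutive
--     pair, so a non-overlapping repeat is 'first index <= j - 2'; the gap rule
--     is checked in the same pass."""
--     return sum(1 for w in words if _nice(w))
--
--
-- def _nice(w: str) -> bool:
--     first = {}
--     doub = False
--     between = False
--     for j in range(len(w) - 1):
--         p = w[j:j + 2]
--         if p in first:
--             if first[p] <= j - 2:
--                 doub = True
--         else:
--             first[p] = j
--         if j + 2 < len(w) and w[j] == w[j + 2]:
--             between = True
--     return doub and between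
-- ===== Notes on version B (the rewrite author's own statement) =====
-- stated objective: alternative
-- what changed: Per word, A runs a substring search over the rest of the string at every position; B instead makes a single pass keeping a dict of each pair's first index (a repeat at distance >= 2 means the non-overlapping-pair rule holds) and checks the gap rule in the same pass.
import Mathlib
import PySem

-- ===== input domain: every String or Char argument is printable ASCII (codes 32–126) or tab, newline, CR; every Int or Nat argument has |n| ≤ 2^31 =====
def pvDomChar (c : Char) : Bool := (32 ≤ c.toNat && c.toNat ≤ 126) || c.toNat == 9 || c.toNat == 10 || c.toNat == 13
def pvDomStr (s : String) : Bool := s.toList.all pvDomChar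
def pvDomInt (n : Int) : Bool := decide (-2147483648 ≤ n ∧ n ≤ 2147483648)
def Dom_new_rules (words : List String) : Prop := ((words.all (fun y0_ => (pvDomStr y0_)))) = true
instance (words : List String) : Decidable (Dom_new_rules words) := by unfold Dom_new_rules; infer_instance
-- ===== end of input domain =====

-- B replaces A's per-word nested scan (a substring search at every position) by a single pass
-- keeping a dict of first pair occurrences; objective: alternative algorithm, same observed cost.

-- ===== PORT A =====
-- A's inner loop over one word: state (doub, between), letter in range(len(i) - 2);
-- 'i[letter] + i[letter+1] in i[letter+2:]' is isIn of the 2-char list in the dropped suffix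
-- (all indices are in range for letter < len - 2, so getD is exact here).
def pyNiceA (cs : List Char) : Bool × Bool :=
  (List.range (cs.length - 2)).foldl
    (fun st l =>
      ((if PySem.Chars.isIn [cs.getD l ' ', cs.getD (l + 1) ' '] (cs.drop (l + 2)) then true else st.1),
       (if cs.getD l ' ' = cs.getD (l + 2) ' ' then true else st.2)))
    (false, false)

def new_rules (words : List String) : Int :=
  words.foldl
    (fun total i =>
      let st := pyNiceA i.toList
      if st.1 && st.2 then total + 1 else total)
    0

-- ===== PORT B =====
-- the 2-char string w[j:j+2] used as Source B's dict key is encoded as the pair of its two characters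
def pairAt (cs : List Char) (j : Nat) : Char × Char := (cs.getD j ' ', cs.getD (j + 1) ' ')

-- one step of Source B's loop body over the state (first, doub, between)
def niceBStep (cs : List Char) (st : PySem.Dict (Char × Char) Int × Bool × Bool) (j : Nat) :
    PySem.Dict (Char × Char) Int × Bool × Bool :=
  let p := pairAt cs j
  let fd : PySem.Dict (Char × Char) Int × Bool :=
    match st.1.get? p with
    | some i => (st.1, if i ≤ (j : Int) - 2 then true else st.2.1)
    | none => (st.1.insert p (j : Int), st.2.1)
  (fd.1, fd.2,
    if (j + 2 < cs.length) ∧ cs.getD j ' ' = cs.getD (j + 2) ' ' then true else st.2.2)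

def niceB (cs : List Char) : Bool :=
  let st := (List.range (cs.length - 1)).foldl (niceBStep cs) (PySem.Dict.empty, false, false)
  st.2.1 && st.2.2

def new_rules_alt (words : List String) : Int :=
  ((words.countP (fun w => niceB w.toList) : Nat) : Int)

-- ===== PRECONDITION & SPEC =====
def Spec_new_rules (words : List String) (out : Int) : Prop := out = new_rules_alt words
instance (words : List String) (out : Int) : Decidable (Spec_new_rules words out) := by unfold Spec_new_rules; infer_instance

-- ===== CLAIM (what is proved, stated in full; the proofs are below) =====
def Claim_equal_new_rules : Prop := ∀ (words : List String), Dom_new_rules words → Spec_new_rules words (new_rules words)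

-- ===== LEMMAS AND PROOFS =====

-- shared characterisation of the two rules as bounded 'any' scans
def bDoub (cs : List Char) : Bool :=
  (List.range (cs.length - 1)).any fun q => (List.range q).any fun p =>
    decide (p + 2 ≤ q ∧ pairAt cs p = pairAt cs q)

def bBetween (cs : List Char) : Bool :=
  (List.range (cs.length - 1)).any fun j =>
    decide (j + 2 < cs.length ∧ cs.getD j ' ' = cs.getD (j + 2) ' ')

lemma getElem?_eq_some_getD_iff (u : List Char) (i : Nat) (a : Char) :
    u[i]? = some a ↔ i < u.length ∧ u.getD i ' ' = a := by
  constructor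
  · intro h
    have hi : i < u.length := by
      by_contra hn
      rw [List.getElem?_eq_none (by omega)] at h
      cases h
    refine ⟨hi, ?_⟩
    simp [List.getD_eq_getElem?_getD, h]
  · rintro ⟨hi, h⟩
    simpa [List.getElem?_eq_getElem hi, List.getD_eq_getElem?_getD,
      List.getElem?_eq_getElem hi] using h

lemma pair_prefix_iff (a b : Char) (u : List Char) :
    ([a, b] <+: u) ↔ u[0]? = some a ∧ u[1]? = some b := by
  match u with
  | [] => simp
  | [x] => simp [List.cons_prefix_cons]
  | x :: y :: t => simp [List.cons_prefix_cons, eq_comm]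

lemma pair_prefix_drop (cs : List Char) (q : Nat) (a b : Char) :
    ([a, b] <+: cs.drop q) ↔ q + 1 < cs.length ∧ cs.getD q ' ' = a ∧ cs.getD (q + 1) ' ' = b := by
  rw [pair_prefix_iff]
  rw [List.getElem?_drop, List.getElem?_drop]
  rw [getElem?_eq_some_getD_iff, getElem?_eq_some_getD_iff]
  constructor
  · rintro ⟨⟨h1, h2⟩, h3, h4⟩; exact ⟨h3, by simpa using h2, h4⟩
  · rintro ⟨h1, h2, h3⟩; exact ⟨⟨by omega, by simpa using h2⟩, h1, h3⟩

lemma isIn_pair_drop (cs : List Char) (m : Nat) (a b : Char) :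
    PySem.Chars.isIn [a, b] (cs.drop m) = true ↔
      ∃ q, m ≤ q ∧ q + 1 < cs.length ∧ cs.getD q ' ' = a ∧ cs.getD (q + 1) ' ' = b := by
  rw [← PySem.Chars.exists_prefix_drop_iff_isIn]
  constructor
  · rintro ⟨j, hpre⟩
    rw [List.drop_drop, pair_prefix_drop] at hpre
    exact ⟨m + j, by omega, hpre⟩
  · rintro ⟨q, hmq, h⟩
    refine ⟨q - m, ?_⟩
    rw [List.drop_drop, pair_prefix_drop]
    have : m + (q - m) = q := by omega
    rw [this]
    exact h

lemma anyA_doub (cs : List Char) :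
    ((List.range (cs.length - 2)).any fun l =>
      PySem.Chars.isIn [cs.getD l ' ', cs.getD (l + 1) ' '] (cs.drop (l + 2))) = bDoub cs := by
  rw [Bool.eq_iff_iff]
  unfold bDoub
  simp only [List.any_eq_true, List.mem_range, decide_eq_true_eq]
  constructor
  · rintro ⟨l, hl, hin⟩
    rw [isIn_pair_drop] at hin
    obtain ⟨q, hmq, hq, ha, hb⟩ := hin
    refine ⟨q, by omega, l, by omega, by omega, ?_⟩
    simp only [pairAt, Prod.mk.injEq]
    exact ⟨ha.symm, hb.symm⟩
  · rintro ⟨q, hq, p, hpq, hp2, hpair⟩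
    refine ⟨p, by omega, ?_⟩
    rw [isIn_pair_drop]
    simp only [pairAt, Prod.mk.injEq] at hpair
    exact ⟨q, by omega, by omega, hpair.1.symm, hpair.2.symm⟩

lemma anyA_between (cs : List Char) :
    ((List.range (cs.length - 2)).any fun l =>
      decide (cs.getD l ' ' = cs.getD (l + 2) ' ')) = bBetween cs := by
  rw [Bool.eq_iff_iff]
  unfold bBetween
  simp only [List.any_eq_true, List.mem_range, decide_eq_true_eq]
  constructor
  · rintro ⟨l, hl, h⟩
    exact ⟨l, by omega, by omega, h⟩
  · rintro ⟨j, hj, h2, h⟩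
    exact ⟨j, by omega, h⟩


lemma pyNiceA_eq (cs : List Char) :
    pyNiceA cs = (bDoub cs, bBetween cs) := by
  unfold pyNiceA
  rw [PySem.List.foldl_prod_mk
    (f := fun acc l => if PySem.Chars.isIn [cs.getD l ' ', cs.getD (l + 1) ' '] (cs.drop (l + 2)) then true else acc)
    (g := fun acc l => if cs.getD l ' ' = cs.getD (l + 2) ' ' then true else acc)]
  rw [PySem.List.foldl_if_true_eq, PySem.List.foldl_ite_true_eq]
  rw [Bool.false_or, Bool.false_or, anyA_doub, anyA_between]

lemma foldB_inv (cs : List Char) (m : Nat) :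
    (∀ pr, ((List.range m).foldl (niceBStep cs) (PySem.Dict.empty, false, false)).1.get? pr
        = ((List.range m).find? (fun p => pairAt cs p == pr)).map (fun p => (p : Int)))
    ∧ ((List.range m).foldl (niceBStep cs) (PySem.Dict.empty, false, false)).2.1
        = ((List.range m).any fun q => (List.range q).any fun p =>
            decide (p + 2 ≤ q ∧ pairAt cs p = pairAt cs q))
    ∧ ((List.range m).foldl (niceBStep cs) (PySem.Dict.empty, false, false)).2.2
        = ((List.range m).any fun j =>
            decide (j + 2 < cs.length ∧ cs.getD j ' ' = cs.getD (j + 2) ' ')) := by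
  induction m with
  | zero => simp [PySem.Dict.get?_empty]
  | succ m ih =>
    obtain ⟨ihd, ih1, ih2⟩ := ih
    rw [List.range_succ]
    simp only [List.foldl_append, List.foldl_cons, List.foldl_nil, List.any_append,
      List.any_cons, List.any_nil, Bool.or_false]
    set st := (List.range m).foldl (niceBStep cs) (PySem.Dict.empty, false, false) with hst
    cases hfind : (List.range m).find? (fun p => pairAt cs p == pairAt cs m) with
    | some i =>
      have hget : st.1.get? (pairAt cs m) = some ((i : Int)) := by rw [ihd, hfind]; rfl
      obtain ⟨hpi, him, hmin⟩ := List.find?_range_eq_some.mp hfind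
      have hpi' : pairAt cs i = pairAt cs m := by simpa using hpi
      have him' : i < m := List.mem_range.mp him
      refine ⟨?_, ?_, ?_⟩
      · intro pr
        have : niceBStep cs st m = (st.1, (if (i : Int) ≤ (m : Int) - 2 then true else st.2.1),
            (if (m + 2 < cs.length) ∧ cs.getD m ' ' = cs.getD (m + 2) ' ' then true else st.2.2)) := by
          simp only [niceBStep, hget]
        rw [this]
        rw [ihd pr]
        cases h2 : (List.range m).find? (fun p => pairAt cs p == pr) with
        | some x => simp [h2]
        | none =>
          have hne : (pairAt cs m == pr) = false := by
            refine beq_false_of_ne ?_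
            intro he
            rw [← he] at h2
            rw [h2] at hfind
            cases hfind
          simp [h2, List.find?, hne]
      · have hany : ((List.range m).any fun p =>
            decide (p + 2 ≤ m ∧ pairAt cs p = pairAt cs m)) = decide (i + 2 ≤ m) := by
          rw [Bool.eq_iff_iff]
          simp only [List.any_eq_true, List.mem_range, decide_eq_true_eq]
          constructor
          · rintro ⟨p, hp, hple, hpair⟩
            have : ¬ p < i := by
              intro hlt
              have := hmin p hlt
              simp [hpair] at this
            omega
          · intro h
            exact ⟨i, by omega, h, hpi'⟩
        have : (niceBStep cs st m).2.1 = (if (i : Int) ≤ (m : Int) - 2 then true else st.2.1) := by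
          simp only [niceBStep, hget]
        rw [this, ih1, hany]
        by_cases hc : i + 2 ≤ m
        · rw [if_pos (by omega), decide_eq_true hc, Bool.or_true]
        · rw [if_neg (by omega), decide_eq_false hc, Bool.or_false]
      · have : (niceBStep cs st m).2.2 =
            (if (m + 2 < cs.length) ∧ cs.getD m ' ' = cs.getD (m + 2) ' ' then true else st.2.2) := by
          simp only [niceBStep, hget]
        rw [this, ih2]
        by_cases hc : (m + 2 < cs.length) ∧ cs.getD m ' ' = cs.getD (m + 2) ' '
        · rw [if_pos hc, decide_eq_true hc, Bool.or_true]
        · rw [if_neg hc, decide_eq_false hc, Bool.or_false]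
    | none =>
      have hget : st.1.get? (pairAt cs m) = none := by rw [ihd, hfind]; rfl
      have hnone := List.find?_range_eq_none.mp hfind
      refine ⟨?_, ?_, ?_⟩
      · intro pr
        have : (niceBStep cs st m).1 = st.1.insert (pairAt cs m) ((m : Int)) := by
          simp only [niceBStep, hget]
        rw [this, PySem.Dict.get?_insert, ihd pr]
        by_cases hpr : pr = pairAt cs m
        · subst hpr
          rw [if_pos rfl, List.find?_append, hfind]
          simp [List.find?]
        · rw [if_neg hpr]
          cases h2 : (List.range m).find? (fun p => pairAt cs p == pr) with
          | some x => simp [h2]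
          | none =>
            have hne : (pairAt cs m == pr) = false := by
              simp [Ne.symm hpr]
            simp [h2, List.find?, hne]
      · have hany : ((List.range m).any fun p =>
            decide (p + 2 ≤ m ∧ pairAt cs p = pairAt cs m)) = false := by
          rw [Bool.eq_false_iff]
          intro h
          simp only [List.any_eq_true, List.mem_range, decide_eq_true_eq] at h
          obtain ⟨p, hp, _, hpair⟩ := h
          have := hnone p hp
          simp [hpair] at this
        have : (niceBStep cs st m).2.1 = st.2.1 := by
          simp only [niceBStep, hget]
        rw [this, ih1, hany, Bool.or_false]
      · have : (niceBStep cs st m).2.2 =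
            (if (m + 2 < cs.length) ∧ cs.getD m ' ' = cs.getD (m + 2) ' ' then true else st.2.2) := by
          simp only [niceBStep, hget]
        rw [this, ih2]
        by_cases hc : (m + 2 < cs.length) ∧ cs.getD m ' ' = cs.getD (m + 2) ' '
        · rw [if_pos hc, decide_eq_true hc, Bool.or_true]
        · rw [if_neg hc, decide_eq_false hc, Bool.or_false]

lemma niceB_eq (cs : List Char) :
    niceB cs = (bDoub cs && bBetween cs) := by
  obtain ⟨-, h1, h2⟩ := foldB_inv cs (cs.length - 1)
  unfold bDoub bBetween
  show (((List.range (cs.length - 1)).foldl (niceBStep cs) (PySem.Dict.empty, false, false)).2.1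
      && ((List.range (cs.length - 1)).foldl (niceBStep cs) (PySem.Dict.empty, false, false)).2.2) = _
  rw [h1, h2]

theorem new_rules_spec : Claim_equal_new_rules := by
  intro words _
  unfold Spec_new_rules new_rules new_rules_alt
  show words.foldl
      (fun (total : Int) i => if (pyNiceA i.toList).1 && (pyNiceA i.toList).2 then total + 1 else total)
      0 = ((words.countP (fun w => niceB w.toList) : Nat) : Int)
  have h1 : words.foldl
      (fun (total : Int) i => if (pyNiceA i.toList).1 && (pyNiceA i.toList).2 then total + 1 else total) 0
      = words.foldl (fun (total : Int) i => if niceB i.toList then total + 1 else total) 0 := by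
    apply PySem.List.foldl_congr_mem
    intro acc x _
    rw [pyNiceA_eq, niceB_eq]
  rw [h1, PySem.List.foldl_if_add_one, zero_add]
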